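-- pv_equiv track=rewrite | github.com/gcsumiao/rs2-dashboard | scripts/build_rs2_data.py | pick_primary
-- ===== SOURCE A (Python) =====
-- from collections import Counter, defaultdict
-- from typing import Dict, Iterable, List, Optional, Tuple
--
-- def pick_primary(counter_by_key: Dict[str, Counter]) -> Dict[str, str]:
--     out: Dict[str, str] = {}
--     for key, counter in counter_by_key.items():
--         if not counter:
--             continue
--         value = sorted(counter.items(), key=lambda item: (-item[1], item[0]))[0][0]
--         out[key] = value
--     return out
-- ===== SOURCE B (Python) =====
-- def pick_primary(counter_by_key):
--     def best(items):
--         it = iter(items)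
--         bv, bc = next(it)
--         for v, c in it:
--             if c > bc or (c == bc and v < bv):
--                 bv, bc = v, c
--         return bv
--     return {key: best(counter.items()) for key, counter in counter_by_key.items() if counter}
-- ===== Notes on version B (the rewrite author's own statement) =====
-- stated objective: alternative
-- what changed: Replaced the per-key sort by (-count, value) followed by indexing with a single-pass running-best tournament (keep the pair with higher count, lexicographically smaller value on ties) inside a dict comprehension; Pre_ excludes association lists with duplicate outer keys, which no Python dict can present and on which A's overwrite-in-place order is accidental.
import Mathlib
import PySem

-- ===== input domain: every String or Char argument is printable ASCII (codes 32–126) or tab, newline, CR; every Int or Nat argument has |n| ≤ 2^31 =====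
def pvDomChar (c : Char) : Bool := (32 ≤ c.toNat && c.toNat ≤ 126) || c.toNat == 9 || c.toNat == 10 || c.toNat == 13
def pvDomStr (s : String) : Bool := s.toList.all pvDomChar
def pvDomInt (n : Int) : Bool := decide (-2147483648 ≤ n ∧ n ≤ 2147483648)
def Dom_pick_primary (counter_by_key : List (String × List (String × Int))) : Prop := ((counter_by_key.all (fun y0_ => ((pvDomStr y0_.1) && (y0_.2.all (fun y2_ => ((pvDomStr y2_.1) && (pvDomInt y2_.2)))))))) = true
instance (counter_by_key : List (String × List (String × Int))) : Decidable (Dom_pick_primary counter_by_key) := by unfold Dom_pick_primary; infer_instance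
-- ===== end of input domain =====

-- B replaces the per-key sort by (-count, value) + first element with a single-pass running-best
-- tournament in a dict comprehension; return value proved equal on inputs with distinct outer keys.

-- ===== PORT A =====
-- out[key] = sorted(counter.items(), key=lambda item: (-item[1], item[0]))[0][0]; the [0] index
-- is guarded by `if not counter: continue`, so the `none` branch of head? is unreachable.
def pick_primary (counter_by_key : List (String × List (String × Int))) : List (String × String) :=
  (counter_by_key.foldl
    (fun (out : PySem.Dict String String) kc =>
      if kc.2.isEmpty then out
      else
        match (PySem.List.sorted2 kc.2 (fun it => -it.2) (fun it => it.1)).head? with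
        | some it => out.insert kc.1 it.1
        | none => out)
    PySem.Dict.empty).items

-- ===== PORT B =====
-- best(items): bv,bc = next(it); then one pass keeping the new pair when c > bc or (c == bc and v < bv).
def pvBestLoop : (String × Int) → List (String × Int) → String
  | m, [] => m.1
  | m, vc :: t =>
      if decide (m.2 < vc.2) || (vc.2 == m.2 && decide (vc.1 < m.1)) then pvBestLoop vc t
      else pvBestLoop m t

-- {key: best(counter.items()) for key, counter in counter_by_key.items() if counter}; under
-- Pre_ (distinct outer keys) the comprehension is this filter+map; `next` on the non-empty
-- counter is the cons split (the [] branch is unreachable under the filter).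
def pick_primary_alt (counter_by_key : List (String × List (String × Int))) : List (String × String) :=
  (counter_by_key.filter (fun kc => !kc.2.isEmpty)).map
    (fun kc =>
      (kc.1,
        match kc.2 with
        | [] => ""
        | x :: t => pvBestLoop x t))

-- ===== PRECONDITION & SPEC =====
-- Pre_ excludes association lists with duplicate outer keys: a Python dict cannot present them,
-- and A's overwrite-in-place order on such lists is accidental.
def Pre_pick_primary (counter_by_key : List (String × List (String × Int))) : Prop :=
  (counter_by_key.map Prod.fst).Nodup
instance (counter_by_key : List (String × List (String × Int))) : Decidable (Pre_pick_primary counter_by_key) := by unfold Pre_pick_primary; infer_instance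

def pvWitness_pick_primary : (List (String × List (String × Int))) :=
  [("a", [("x", 1), ("y", 2)]), ("b", [])]

def Spec_pick_primary (counter_by_key : List (String × List (String × Int))) (out : List (String × String)) : Prop := out = pick_primary_alt counter_by_key
instance (counter_by_key : List (String × List (String × Int))) (out : List (String × String)) : Decidable (Spec_pick_primary counter_by_key out) := by unfold Spec_pick_primary; infer_instance

-- ===== CLAIM (what is proved, stated in full; the proofs are below) =====
def Claim_equal_pick_primary : Prop := ∀ (counter_by_key : List (String × List (String × Int))), Dom_pick_primary counter_by_key → Pre_pick_primary counter_by_key → Spec_pick_primary counter_by_key (pick_primary counter_by_key)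

-- ===== LEMMAS AND PROOFS =====

-- The strict "comes strictly before" test sorted2 uses with keys (-count, value).
def pvBefore (x y : String × Int) : Bool :=
  decide ((-x.2 : Int) < -y.2) || (!decide ((-y.2 : Int) < -x.2) && decide (x.1 < y.1))

-- The one-step selection fold whose result is the head of A's insertion sort.
def pvStep (o : Option (String × Int)) (x : String × Int) : Option (String × Int) :=
  match o with
  | none => some x
  | some m => if pvBefore x m then some x else some m

-- Proof-side selection: the pair the head of A's sort ends up being.
def pvSel (m : String × Int) : List (String × Int) → String × Int
  | [] => m
  | x :: t => if pvBefore x m then pvSel x t else pvSel m t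

theorem head?_insertBy (x : String × Int) (acc : List (String × Int)) :
    (PySem.List.insertBy pvBefore x acc).head? = pvStep acc.head? x := by
  cases acc with
  | nil => simp [PySem.List.insertBy, pvStep]
  | cons y ys =>
    simp only [PySem.List.insertBy, pvStep, List.head?]
    by_cases h : pvBefore x y = true <;> simp [h]

theorem head?_foldl_insertBy (xs : List (String × Int)) :
    ∀ acc : List (String × Int),
      (xs.foldl (fun a x => PySem.List.insertBy pvBefore x a) acc).head? =
        xs.foldl pvStep acc.head? := by
  induction xs with
  | nil => intro acc; rfl
  | cons x t ih =>
    intro acc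
    simp only [List.foldl]
    rw [ih, head?_insertBy]

theorem head?_sorted2 (xs : List (String × Int)) :
    (PySem.List.sorted2 xs (fun it => -it.2) (fun it => it.1)).head? =
      xs.foldl pvStep none := by
  have h1 : PySem.List.sorted2 xs (fun it => (-it.2 : Int)) (fun it => it.1) =
      xs.foldl (fun a x => PySem.List.insertBy pvBefore x a) [] := rfl
  rw [h1, head?_foldl_insertBy]
  rfl

theorem foldl_pvStep_eq_pvSel (xs : List (String × Int)) :
    ∀ m : String × Int, xs.foldl pvStep (some m) = some (pvSel m xs) := by
  induction xs with
  | nil => intro m; rfl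
  | cons x t ih =>
    intro m
    simp only [List.foldl, pvStep, pvSel]
    by_cases h : pvBefore x m = true
    · rw [if_pos h, if_pos h]; exact ih x
    · rw [if_neg h, if_neg h]; exact ih m

-- A's sort-key comparison coincides with B's tournament condition.
theorem pvBefore_eq (x m : String × Int) :
    pvBefore x m = (decide (m.2 < x.2) || (x.2 == m.2 && decide (x.1 < m.1))) := by
  simp only [pvBefore, neg_lt_neg_iff]
  by_cases h1 : m.2 < x.2
  · simp [h1]
  · by_cases h2 : x.2 < m.2
    · have h3 : ¬ x.2 = m.2 := by omega
      simp [h1, h2, h3]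
    · have h3 : x.2 = m.2 := by omega
      simp [h2, h3]

theorem pvBestLoop_eq_pvSel (xs : List (String × Int)) :
    ∀ m : String × Int, pvBestLoop m xs = (pvSel m xs).1 := by
  induction xs with
  | nil => intro m; rfl
  | cons x t ih =>
    intro m
    simp only [pvBestLoop, pvSel, ← pvBefore_eq]
    by_cases h : pvBefore x m = true
    · rw [if_pos h, if_pos h]; exact ih x
    · rw [if_neg h, if_neg h]; exact ih m

-- The head value A inserts, written uniformly (matches B's match including the unreachable [] branch).
def pvValA (xs : List (String × Int)) : String :=
  match xs with
  | [] => ""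
  | x :: t => (pvSel x t).1

theorem stepA_eq (out : PySem.Dict String String) (kc : String × List (String × Int)) :
    (if kc.2.isEmpty then out
     else
       match (PySem.List.sorted2 kc.2 (fun it => -it.2) (fun it => it.1)).head? with
       | some it => out.insert kc.1 it.1
       | none => out) =
    (if (!kc.2.isEmpty) = true then out.insert kc.1 (pvValA kc.2) else out) := by
  cases h : kc.2 with
  | nil => simp
  | cons x t =>
    have hh := head?_sorted2 (x :: t)
    have h2 : (x :: t).foldl pvStep none = t.foldl pvStep (some x) := rfl
    rw [h2, foldl_pvStep_eq_pvSel] at hh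
    simp [hh, pvValA]

-- ===== VERDICT (by name: the statement is the Claim_ definition above) =====
theorem pick_primary_spec : Claim_equal_pick_primary := by
  intro l _ hpre
  unfold Spec_pick_primary pick_primary pick_primary_alt
  -- rewrite A's skipping fold as a uniform insert over the filtered list
  have h1 : (l.foldl
      (fun (out : PySem.Dict String String) kc =>
        if kc.2.isEmpty then out
        else
          match (PySem.List.sorted2 kc.2 (fun it => -it.2) (fun it => it.1)).head? with
          | some it => out.insert kc.1 it.1
          | none => out)
      PySem.Dict.empty) =
      ((l.filter (fun kc => !kc.2.isEmpty)).foldl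
        (fun (out : PySem.Dict String String) kc => out.insert kc.1 (pvValA kc.2))
        PySem.Dict.empty) := by
    rw [List.foldl_filter]
    exact PySem.List.foldl_congr_mem l _ _ _ (fun out kc _ => stepA_eq out kc)
  rw [h1]
  have hnd : ((l.filter (fun kc => !kc.2.isEmpty)).map Prod.fst).Nodup :=
    ((List.filter_sublist (p := fun kc => !kc.2.isEmpty)).map Prod.fst).nodup hpre
  rw [PySem.Dict.items_foldl_insert_fresh (l.filter (fun kc => !kc.2.isEmpty)) Prod.fst
        (fun kc => pvValA kc.2) PySem.Dict.empty
        (fun a _ => PySem.Dict.contains_empty a.1) hnd]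
  simp only [PySem.Dict.empty, List.nil_append]
  apply List.map_congr_left
  intro kc _
  cases h : kc.2 with
  | nil => rfl
  | cons x t => simp [pvValA, pvBestLoop_eq_pvSel]
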